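-- pv_equiv track=rewrite | github.com/Tuxedolphin/tiktok-hackathon-2025 | backend/services/fake_detector.py | _count_same_day_reviews
-- ===== SOURCE A (Python) =====
-- from typing import Dict, List, Optional, Any
--
-- def _count_same_day_reviews(reviews: List[Dict[str, Any]]) -> int:
--     """
--     Count reviews posted on the same day.
--
--     Args:
--         reviews: List of review dictionaries
--
--     Returns:
--         Maximum number of reviews posted on any single day
--     """
--     try:
--         dates = [review.get("date", "") for review in reviews if review.get("date")]
--         date_counts: Dict[str, int] = {}
--
--         for date_str in dates:
--             date_only = date_str.split(" ")[0]  # Get just the date part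
--             date_counts[date_only] = date_counts.get(date_only, 0) + 1
--
--         return max(date_counts.values()) if date_counts else 0
--     except:
--         return 0
-- ===== SOURCE B (Python) =====
-- from typing import Dict, List, Optional, Any
--
-- def _count_same_day_reviews(reviews: List[Dict[str, Any]]) -> int:
--     """
--     Count reviews posted on the same day.
--
--     Returns the maximum number of reviews posted on any single day.
--     """
--     try:
--         days = sorted(
--             review.get("date", "").split(" ")[0]
--             for review in reviews
--             if review.get("date")
--         )
--         best = 0
--         run = 0
--         prev = None
--         for day in days:
--             if day == prev:
--                 run += 1
--             else:
--                 prev = day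
--                 run = 1
--             if run > best:
--                 best = run
--         return best
--     except:
--         return 0
-- ===== Notes on version B (the rewrite author's own statement) =====
-- stated objective: alternative
-- what changed: Replaces the dict-of-counts plus max(values) with sorting the day strings once and a single scan that tracks the length of the current run of equal consecutive days and the best run seen.
import Mathlib
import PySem

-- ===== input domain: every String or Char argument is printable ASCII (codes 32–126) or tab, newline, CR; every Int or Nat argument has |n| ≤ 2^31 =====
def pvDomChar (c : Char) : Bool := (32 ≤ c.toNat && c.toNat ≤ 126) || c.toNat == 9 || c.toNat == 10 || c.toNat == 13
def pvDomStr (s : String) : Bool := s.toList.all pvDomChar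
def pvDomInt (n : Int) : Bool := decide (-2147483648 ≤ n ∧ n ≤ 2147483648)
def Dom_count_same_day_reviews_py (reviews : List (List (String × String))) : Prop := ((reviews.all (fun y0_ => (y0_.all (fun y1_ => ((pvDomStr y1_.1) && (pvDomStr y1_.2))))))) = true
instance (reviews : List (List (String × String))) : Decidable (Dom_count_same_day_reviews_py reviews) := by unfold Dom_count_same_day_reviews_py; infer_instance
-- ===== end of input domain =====

-- B replaces A's dict-of-counts + max(values) by sorting the day strings and scanning
-- run lengths of equal consecutive days (objective: alternative algorithm, same result).


-- ===== PORT A =====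
-- review.get("date") is truthy iff the lookup yields a nonempty string
def pvHasDate (r : List (String × String)) : Bool :=
  ((PySem.Dict.mk r).get? "date").getD "" != ""

-- d.split(" ")[0]; split with a nonempty separator never returns [], so headD "" is exact
def pvDayOf (d : String) : String :=
  (((PySem.Str.split? d " ").getD []).headD "")

def count_same_day_reviews_py (reviews : List (List (String × String))) : Int :=
  let dates : List String :=
    (reviews.filter pvHasDate).map (fun r => ((PySem.Dict.mk r).get? "date").getD "")
  let date_counts : PySem.Dict String Int :=
    dates.foldl (fun d date_str =>
      d.insert (pvDayOf date_str) (d.getD (pvDayOf date_str) 0 + 1)) PySem.Dict.empty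
  if date_counts.items ≠ [] then
    (PySem.List.max? date_counts.values (fun v => v)).getD 0
  else 0

-- ===== PORT B =====
-- the run-length scan over the sorted day list: state (prev, run, best)
def pvScan (days : List String) : Option String × Int × Int :=
  days.foldl (fun st day =>
    let run : Int := if some day = st.1 then st.2.1 + 1 else 1
    (some day, run, if run > st.2.2 then run else st.2.2)) (none, 0, 0)

def count_same_day_reviews_py_alt (reviews : List (List (String × String))) : Int :=
  let days : List String :=
    PySem.List.sorted
      ((reviews.filter pvHasDate).map
        (fun r => pvDayOf (((PySem.Dict.mk r).get? "date").getD "")))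
      (fun x => x) false
  (pvScan days).2.2

-- ===== PRECONDITION & SPEC =====
def Spec_count_same_day_reviews_py (reviews : List (List (String × String))) (out : Int) : Prop := out = count_same_day_reviews_py_alt reviews
instance (reviews : List (List (String × String))) (out : Int) : Decidable (Spec_count_same_day_reviews_py reviews out) := by unfold Spec_count_same_day_reviews_py; infer_instance

-- ===== CLAIM (what is proved, stated in full; the proofs are below) =====
def Claim_equal_count_same_day_reviews_py : Prop := ∀ (reviews : List (List (String × String))), Dom_count_same_day_reviews_py reviews → Spec_count_same_day_reviews_py reviews (count_same_day_reviews_py reviews)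

-- ===== LEMMAS AND PROOFS =====

-- the day list both programs count over
def pvDays (reviews : List (List (String × String))) : List String :=
  (reviews.filter pvHasDate).map (fun r => pvDayOf (((PySem.Dict.mk r).get? "date").getD ""))

-- the order-free value both programs compute: max over distinct days of the day's count
def pvMaxCount (ds : List String) : Int :=
  Finset.fold max 0 (fun k => (ds.count k : Int)) ds.toFinset

-- B's fold step, named
def pvStep (st : Option String × Int × Int) (day : String) : Option String × Int × Int :=
  let run : Int := if some day = st.1 then st.2.1 + 1 else 1
  (some day, run, if run > st.2.2 then run else st.2.2)

theorem pvScan_eq (days : List String) : pvScan days = days.foldl pvStep (none, 0, 0) := rfl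

theorem pv_fold_max_base (F : Finset String) (f : String → Int) (b c : Int) :
    Finset.fold max (max b c) f F = max c (Finset.fold max b f F) := by
  classical
  induction F using Finset.induction_on with
  | empty => simp [max_comm]
  | insert a s ha ih =>
      rw [Finset.fold_insert ha, ih, Finset.fold_insert ha]
      exact max_left_comm _ _ _

theorem pv_le_fold {F : Finset String} {f : String → Int} {b : Int} {a : String}
    (h : a ∈ F) : f a ≤ Finset.fold max b f F :=
  (Finset.le_fold_max _).mpr (Or.inr ⟨a, h, le_rfl⟩)

theorem pv_fold_absorb {F : Finset String} {f : String → Int} {b c : Int} {a : String}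
    (h : a ∈ F) (hc : c ≤ f a) :
    Finset.fold max (max b c) f F = Finset.fold max b f F := by
  rw [pv_fold_max_base]
  exact max_eq_right (hc.trans (pv_le_fold h))

theorem pv_foldl_max_eq_fold (l : List String) (hl : l.Nodup) (f : String → Int) :
    ∀ b : Int, (l.map f).foldl max b = Finset.fold max b f l.toFinset := by
  induction l with
  | nil => intro b; simp
  | cons x t ih =>
      intro b
      have hx : x ∉ t := (List.nodup_cons.mp hl).1
      have hxF : x ∉ t.toFinset := by simpa using hx
      rw [List.map_cons, List.foldl_cons, ih (List.nodup_cons.mp hl).2,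
        List.toFinset_cons, Finset.fold_insert hxF, pv_fold_max_base, max_comm]

-- the scan invariant: after a sorted prefix ending in a run of a of length r, with best b,
-- the final best is the max of b and each remaining day's total (r added to a's)
theorem pv_scan_sorted (s : List String) (hs : s.Pairwise (· ≤ ·)) :
    ∀ (a : String), (∀ x ∈ s, a ≤ x) → ∀ (r b : Int), r ≤ b →
    (s.foldl pvStep (some a, r, b)).2.2
      = Finset.fold max b (fun k => (s.count k : Int) + if k = a then r else 0) s.toFinset := by
  induction s with
  | nil => intro a _ r b _; simp
  | cons x t ih =>
      intro a ha r b hrb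
      have hpt : t.Pairwise (· ≤ ·) := (List.pairwise_cons.mp hs).2
      have hxt : ∀ y ∈ t, x ≤ y := (List.pairwise_cons.mp hs).1
      have hcount : ∀ k : String, ((x :: t).count k : Int)
          = (t.count k : Int) + (if k = x then 1 else 0) := by
        intro k
        rw [List.count_cons]
        rcases eq_or_ne k x with h | h
        · subst h; simp
        · simp [h, Ne.symm h]
      by_cases hxa : x = a
      · subst hxa
        have hacc : pvStep (some x, r, b) x = (some x, r + 1, max b (r + 1)) := by
          simp only [pvStep]
          simp
          split_ifs <;> simp_all <;> omega
        rw [List.foldl_cons, hacc, ih hpt x hxt (r + 1) (max b (r + 1)) (le_max_right _ _)]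
        have hfun : (fun k => ((x :: t).count k : Int) + if k = x then r else 0)
            = fun k => (t.count k : Int) + if k = x then r + 1 else 0 := by
          funext k
          rw [hcount k]
          split_ifs <;> ring
        rw [List.toFinset_cons, hfun]
        by_cases hmem : x ∈ t.toFinset
        · rw [Finset.insert_eq_of_mem hmem]
          refine pv_fold_absorb hmem ?_
          simp only [if_pos trivial]
          omega
        · have hxnott : x ∉ t := fun h => hmem (List.mem_toFinset.mpr h)
          have hc0 : t.count x = 0 := List.count_eq_zero.mpr hxnott
          rw [Finset.fold_insert hmem, pv_fold_max_base]
          congr 1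
          simp [hc0]
      · -- new day x ≠ a: a is strictly below everything remaining
        have hax : a < x := lt_of_le_of_ne (ha x (List.mem_cons_self)) (Ne.symm hxa)
        have hacc : pvStep (some a, r, b) x = (some x, 1, max b 1) := by
          simp only [pvStep]
          simp [hxa]
          split_ifs <;> simp_all <;> omega
        rw [List.foldl_cons, hacc, ih hpt x hxt 1 (max b 1) (le_max_right _ _)]
        have hanotin : a ∉ (x :: t) := by
          intro hmem
          rcases List.mem_cons.mp hmem with h | h
          · exact hxa h.symm
          · exact absurd (hxt a h) (not_le.mpr hax)
        have hfun1 : (fun k => (t.count k : Int) + if k = x then 1 else 0)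
            = fun k => ((x :: t).count k : Int) := by
          funext k; rw [hcount k]
        rw [hfun1, List.toFinset_cons]
        have hfun2 : ∀ k ∈ insert x t.toFinset,
            ((x :: t).count k : Int) + (if k = a then r else 0) = ((x :: t).count k : Int) := by
          intro k hk
          have hka : k ≠ a := by
            intro h; subst h
            rcases Finset.mem_insert.mp hk with h | h
            · exact hxa h.symm
            · exact hanotin (List.mem_cons_of_mem _ (List.mem_toFinset.mp h))
          simp [hka]
        rw [Finset.fold_congr hfun2]
        by_cases hmem : x ∈ t.toFinset
        · rw [Finset.insert_eq_of_mem hmem]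
          refine pv_fold_absorb hmem ?_
          rw [hcount x]
          simp only [if_pos trivial]
          omega
        · have hxnott : x ∉ t := fun h => hmem (List.mem_toFinset.mpr h)
          have hc0 : t.count x = 0 := List.count_eq_zero.mpr hxnott
          rw [Finset.fold_insert hmem, pv_fold_max_base]
          congr 1
          rw [hcount x]
          simp [hc0]

-- folding from a member's count is the same as folding from 0
theorem pv_fold_from_count (ds : List String) (x : String) (hx : x ∈ ds) :
    Finset.fold max ((ds.count x : Int)) (fun k => (ds.count k : Int)) ds.toFinset
      = pvMaxCount ds := by
  have hmem : x ∈ ds.toFinset := List.mem_toFinset.mpr hx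
  have h0 : max 0 ((ds.count x : Int)) = (ds.count x : Int) :=
    max_eq_right (by positivity)
  unfold pvMaxCount
  calc Finset.fold max ((ds.count x : Int)) (fun k => (ds.count k : Int)) ds.toFinset
      = Finset.fold max (max 0 ((ds.count x : Int))) (fun k => (ds.count k : Int)) ds.toFinset := by
        rw [h0]
    _ = Finset.fold max 0 (fun k => (ds.count k : Int)) ds.toFinset :=
        pv_fold_absorb hmem le_rfl

theorem pvA_eq (reviews : List (List (String × String))) :
    count_same_day_reviews_py reviews = pvMaxCount (pvDays reviews) := by
  simp only [count_same_day_reviews_py]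
  have hdict :
      ((reviews.filter pvHasDate).map
          (fun r => ((PySem.Dict.mk r).get? "date").getD "")).foldl
        (fun d date_str =>
          d.insert (pvDayOf date_str) (d.getD (pvDayOf date_str) 0 + 1)) PySem.Dict.empty
        = PySem.Dict.counter (pvDays reviews) := by
    rw [← PySem.Dict.foldl_insert_getD_add_one_eq_counter]
    unfold pvDays
    rw [show (fun r : List (String × String) => pvDayOf (((PySem.Dict.mk r).get? "date").getD ""))
        = pvDayOf ∘ (fun r : List (String × String) => ((PySem.Dict.mk r).get? "date").getD "")
      from rfl, ← List.map_map]
    simp only [List.foldl_map]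
  rw [hdict]
  rcases hds : pvDays reviews with _ | ⟨d0, ds'⟩
  · simp [pvMaxCount, PySem.Dict.counter, PySem.Dict.empty]
  · rw [← hds]
    have hdne : pvDays reviews ≠ [] := by rw [hds]; exact List.cons_ne_nil _ _
    have hlne : PySem.Set.ofList (pvDays reviews) ≠ [] := by
      intro h
      have : d0 ∈ PySem.Set.ofList (pvDays reviews) :=
        (PySem.Set.mem_ofList _ _).mpr (by rw [hds]; exact List.mem_cons_self)
      rw [h] at this
      exact List.not_mem_nil this
    obtain ⟨h0, l', hl⟩ := List.exists_cons_of_ne_nil hlne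
    have hitems : (PySem.Dict.counter (pvDays reviews)).items
        = (PySem.Set.ofList (pvDays reviews)).map
            (fun k => (k, ((pvDays reviews).count k : Int))) :=
      PySem.Dict.items_counter _
    have hvals : (PySem.Dict.counter (pvDays reviews)).values
        = (PySem.Set.ofList (pvDays reviews)).map
            (fun k => ((pvDays reviews).count k : Int)) := by
      show ((PySem.Dict.counter (pvDays reviews)).items).map (·.2) = _
      rw [hitems, List.map_map]
      rfl
    have hitne : (PySem.Dict.counter (pvDays reviews)).items ≠ [] := by
      rw [hitems, hl]
      exact List.cons_ne_nil _ _
    rw [if_pos hitne, hvals, hl, List.map_cons, PySem.List.max?_id_cons]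
    show (l'.map fun k => ((pvDays reviews).count k : Int)).foldl max
        (((pvDays reviews).count h0 : Int)) = _
    have hfold := pv_foldl_max_eq_fold (h0 :: l')
      (by rw [← hl]; exact PySem.Set.nodup_ofList _)
      (fun k => ((pvDays reviews).count k : Int)) (((pvDays reviews).count h0 : Int))
    rw [List.map_cons, List.foldl_cons, max_self] at hfold
    rw [hfold]
    have hfs : (h0 :: l').toFinset = (pvDays reviews).toFinset := by
      rw [← hl]
      ext k
      simp [PySem.Set.mem_ofList]
    rw [hfs]
    refine pv_fold_from_count _ h0 ?_
    refine (PySem.Set.mem_ofList _ _).mp ?_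
    rw [hl]
    exact List.mem_cons_self

theorem pvB_eq (reviews : List (List (String × String))) :
    count_same_day_reviews_py_alt reviews = pvMaxCount (pvDays reviews) := by
  show (pvScan (PySem.List.sorted (pvDays reviews) (fun x => x) false)).2.2 = _
  have hperm := PySem.List.sorted_perm (pvDays reviews) (fun x : String => x) false
  have hpw : (PySem.List.sorted (pvDays reviews) (fun x : String => x) false).Pairwise (· ≤ ·) :=
    PySem.List.sorted_pairwise (pvDays reviews) (fun x => x)
  rcases hsorted : PySem.List.sorted (pvDays reviews) (fun x : String => x) false with _ | ⟨x, t⟩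
  · have hnil : pvDays reviews = [] :=
      (PySem.List.sorted_eq_nil_iff _ _ _).mp hsorted
    rw [hnil]
    simp [pvScan, pvMaxCount]
  · rw [hsorted] at hperm hpw
    rw [pvScan_eq, List.foldl_cons]
    have hacc : pvStep (none, 0, 0) x = (some x, 1, 1) := by
      simp [pvStep]
    rw [hacc, pv_scan_sorted t (List.pairwise_cons.mp hpw).2 x (List.pairwise_cons.mp hpw).1
      1 1 le_rfl]
    have hfun : (fun k => (t.count k : Int) + if k = x then 1 else 0)
        = fun k => ((x :: t).count k : Int) := by
      funext k
      rw [List.count_cons]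
      rcases eq_or_ne k x with h | h
      · subst h; simp
      · simp [h, Ne.symm h]
    rw [hfun]
    have hstep : Finset.fold max 1 (fun k => ((x :: t).count k : Int)) t.toFinset
        = Finset.fold max 0 (fun k => ((x :: t).count k : Int)) (x :: t).toFinset := by
      rw [List.toFinset_cons]
      by_cases hmem : x ∈ t.toFinset
      · rw [Finset.insert_eq_of_mem hmem]
        have h1 : max (0 : Int) 1 = 1 := by omega
        rw [← h1]
        refine pv_fold_absorb hmem ?_
        have : (1 : Int) ≤ ((x :: t).count x : Int) := by
          exact_mod_cast List.one_le_count_iff.mpr List.mem_cons_self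
        simp only [List.count_cons, if_pos rfl] at this ⊢; omega
      · rw [Finset.fold_insert hmem]
        have h1 : max (0 : Int) 1 = 1 := by omega
        rw [← h1, pv_fold_max_base]
        congr 1
        have hc0 : t.count x = 0 :=
          List.count_eq_zero.mpr (fun h => hmem (List.mem_toFinset.mpr h))
        rw [List.count_cons]
        simp [hc0]
    rw [hstep]
    unfold pvMaxCount
    have hfs : (x :: t).toFinset = (pvDays reviews).toFinset :=
      List.toFinset_eq_of_perm _ _ hperm
    rw [hfs]
    apply Finset.fold_congr
    intro k _
    exact congrArg _ (hperm.count_eq k)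

-- ===== VERDICT (by name: the statement is the Claim_ definition above) =====
theorem count_same_day_reviews_py_spec : Claim_equal_count_same_day_reviews_py := by
  intro reviews _
  unfold Spec_count_same_day_reviews_py
  rw [pvA_eq, pvB_eq]
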